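-- pv_equiv track=rewrite | github.com/w-mayer/consistency_analysis | c2.py | query_matches
-- ===== SOURCE A (Python) =====
-- def query_matches(code_set, query_codes):
--     """
--     Check if a code set satisfies a query.
--     Returns True if ANY code matches ANY query code (exact or prefix).
--     """
--     for code in code_set:
--         code_str = str(code).strip()
--         for query in query_codes:
--             query_str = str(query).strip()
--             if code_str == query_str or code_str.startswith(query_str):
--                 return True
--     return False
-- ===== SOURCE B (Python) =====
-- def query_matches(code_set, query_codes):
--     # Alternative algorithm: build the set of stripped queries once, then test each
--     # code by hashing all of its prefixes against that set (no scan over queries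
--     # per code). code.startswith(q) or code == q  <=>  q is a prefix of code.
--     queries = {str(q).strip() for q in query_codes}
--     for code in code_set:
--         s = str(code).strip()
--         if any(s[:i] in queries for i in range(len(s) + 1)):
--             return True
--     return False
-- ===== Notes on version B (the rewrite author's own statement) =====
-- stated objective: alternative
-- what changed: B builds a hash set of the stripped queries once and tests each code by looking up each of its prefixes in that set, replacing A's per-code scan over all queries (startswith-or-equal is exactly 'some prefix of the code is a query'); it trades the O(m) query scan per code for O(L) prefix lookups per code.
import Mathlib
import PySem

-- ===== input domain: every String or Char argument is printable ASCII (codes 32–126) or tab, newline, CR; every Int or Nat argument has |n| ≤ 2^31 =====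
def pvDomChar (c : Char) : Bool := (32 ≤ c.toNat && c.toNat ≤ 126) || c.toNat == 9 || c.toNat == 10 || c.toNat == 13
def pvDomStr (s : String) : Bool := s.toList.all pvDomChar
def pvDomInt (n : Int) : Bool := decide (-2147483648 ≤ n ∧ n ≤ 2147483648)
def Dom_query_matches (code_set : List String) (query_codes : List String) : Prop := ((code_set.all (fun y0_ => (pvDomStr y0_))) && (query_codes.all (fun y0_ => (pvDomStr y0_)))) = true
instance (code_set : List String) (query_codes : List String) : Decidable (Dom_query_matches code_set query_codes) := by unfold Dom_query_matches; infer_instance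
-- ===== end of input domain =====

-- B replaces A's per-code scan over all queries by a set of stripped queries built
-- once, testing each code via membership of each of its prefixes (objective: alternative).


-- ===== PORT A =====
def query_matches (code_set : List String) (query_codes : List String) : Bool :=
  code_set.any (fun code =>
    let code_str := PySem.Str.strip code
    query_codes.any (fun query =>
      let query_str := PySem.Str.strip query
      code_str == query_str || PySem.Str.startswith code_str query_str))

-- ===== PORT B =====
-- B: set of stripped queries built once; each code is tested by membership of each of its prefixes.
def query_matches_alt (code_set : List String) (query_codes : List String) : Bool :=
  let queries : PySem.Set String := PySem.Set.ofList (query_codes.map PySem.Str.strip)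
  code_set.any (fun code =>
    let s := PySem.Str.strip code
    (List.range ((PySem.Str.len s).toNat + 1)).any (fun i =>
      PySem.Set.contains queries (PySem.Str.slice s none (some (i : Int)))))

-- ===== PRECONDITION & SPEC =====
def Spec_query_matches (code_set : List String) (query_codes : List String) (out : Bool) : Prop := out = query_matches_alt code_set query_codes
instance (code_set : List String) (query_codes : List String) (out : Bool) : Decidable (Spec_query_matches code_set query_codes out) := by unfold Spec_query_matches; infer_instance

-- ===== CLAIM (what is proved, stated in full; the proofs are below) =====
def Claim_equal_query_matches : Prop := ∀ (code_set : List String) (query_codes : List String), Dom_query_matches code_set query_codes → Spec_query_matches code_set query_codes (query_matches code_set query_codes)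

-- ===== LEMMAS AND PROOFS =====

-- a string slice s[:i] with a natural i is the take of the character list
lemma toList_slice_take (s : String) (i : Nat) :
    (PySem.Str.slice s none (some (i : Int))).toList = s.toList.take i := by
  rw [PySem.Str.toList_slice]
  simp

-- per-code equivalence of the inner tests: "some query equals or prefixes the code"
-- is "some prefix of the code is in the query set"
lemma inner_eq (s : String) (qs : List String) :
    (qs.any (fun query =>
      s == PySem.Str.strip query || PySem.Str.startswith s (PySem.Str.strip query)))
    = ((List.range ((PySem.Str.len s).toNat + 1)).any (fun i =>
        PySem.Set.contains (PySem.Set.ofList (qs.map PySem.Str.strip))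
          (PySem.Str.slice s none (some (i : Int))))) := by
  rw [Bool.eq_iff_iff]
  simp only [List.any_eq_true, Bool.or_eq_true, beq_iff_eq, List.mem_range,
    PySem.Str.startswith_eq, PySem.Chars.startswith_iff, PySem.Str.len_eq,
    PySem.Set.contains_iff, PySem.Set.mem_ofList, List.mem_map, Int.toNat_natCast]
  constructor
  · rintro ⟨q, hq, h⟩
    have hpre : (PySem.Str.strip q).toList <+: s.toList := by
      rcases h with h | h
      · exact h ▸ List.prefix_refl _
      · exact h
    refine ⟨(PySem.Str.strip q).toList.length, by have := hpre.length_le; omega, q, hq, ?_⟩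
    apply String.toList_injective
    rw [toList_slice_take]
    exact List.prefix_iff_eq_take.mp hpre
  · rintro ⟨i, hi, q, hq, h⟩
    refine ⟨q, hq, Or.inr ?_⟩
    have hq' : (PySem.Str.strip q).toList = s.toList.take i := by
      rw [h]; exact toList_slice_take s i
    rw [hq']
    exact List.take_prefix i s.toList

-- ===== VERDICT (by name: the statement is the Claim_ definition above) =====
theorem query_matches_spec : Claim_equal_query_matches := by
  intro code_set query_codes _
  unfold Spec_query_matches query_matches query_matches_alt
  simp only []
  exact congrArg _ (funext fun c => inner_eq (PySem.Str.strip c) query_codes)
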